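-- pv_equiv track=rewrite | github.com/sujalnegi/E-AND-D | app.py | kpd_encrypt
-- ===== SOURCE A (Python) =====
-- def kpd_encrypt(plaintext, key):
--     if not plaintext:
--         return ""
--     if not key:
--         key = "default"
--     if isinstance(plaintext, bytes):
--         try:
--             plaintext = plaintext.decode('utf-8')
--         except:
--             plaintext = plaintext.decode('latin-1')
--
--     p_indices = [ord(c) for c in plaintext]
--     text_len = len(p_indices)
--
--     k_indices = [ord(c) for c in key]
--     key_len = len(k_indices)
--
--     encrypted_chars = []
--     for i in range(text_len):
--         p_val = p_indices[i]
--         k_val = k_indices[i % key_len]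
--         s_val = p_val + k_val
--         d_val = s_val + i
--         e_val = ((d_val - 32) % 95) + 32
--
--         encrypted_chars.append(chr(e_val))
--         block_size = 8
--         final_output = []
--
--     for i in range(0, text_len, block_size):
--         block = encrypted_chars[i : i + block_size]
--         final_output.extend(reversed(block))
--     return "".join(final_output)
-- ===== SOURCE B (Python) =====
-- def kpd_encrypt(plaintext, key):
--     if not plaintext:
--         return ""
--     if not key:
--         key = "default"
--     if isinstance(plaintext, bytes):
--         try:
--             plaintext = plaintext.decode('utf-8')
--         except:
--             plaintext = plaintext.decode('latin-1')
--
--     n = len(plaintext)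
--     key_len = len(key)
--     out = [''] * n
--     for i, c in enumerate(plaintext):
--         e_val = ((ord(c) + ord(key[i % key_len]) + i - 32) % 95) + 32
--         start = (i // 8) * 8
--         end = min(start + 8, n)
--         out[start + end - 1 - i] = chr(e_val)
--     return ''.join(out)
-- ===== Notes on version B (the rewrite author's own statement) =====
-- stated objective: alternative
-- what changed: B eliminates A's second block-reversal pass and the intermediate encrypted list: in a single pass it writes each encrypted character directly into a preallocated output buffer at its reversed-within-block position computed in closed form.
import Mathlib
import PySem

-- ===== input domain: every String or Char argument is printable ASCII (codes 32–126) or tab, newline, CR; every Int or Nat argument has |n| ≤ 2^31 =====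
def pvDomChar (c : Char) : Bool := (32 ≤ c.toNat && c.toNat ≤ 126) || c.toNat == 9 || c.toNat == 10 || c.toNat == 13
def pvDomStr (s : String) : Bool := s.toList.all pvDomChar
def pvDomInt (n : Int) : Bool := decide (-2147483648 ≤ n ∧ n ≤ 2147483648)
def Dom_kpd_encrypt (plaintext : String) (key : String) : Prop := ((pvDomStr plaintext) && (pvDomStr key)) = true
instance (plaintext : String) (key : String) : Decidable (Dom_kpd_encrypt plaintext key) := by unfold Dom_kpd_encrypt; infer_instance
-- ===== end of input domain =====

-- B replaces A's second block-reversal pass by writing each encrypted character directly at its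
-- reversed-within-block destination during the single encryption pass (objective: alternative).

-- ===== PORT A =====
-- Python list indices in A are always in range, so `getD`/`PySem.List.slice` are exact here.
-- A's `final_output = []` is re-assigned on every iteration of the first loop; since the text is
-- non-empty at that point, its net effect is an empty accumulator before the block loop.
def kpd_encrypt (plaintext : String) (key : String) : String :=
  if plaintext.toList = [] then "" else
  let key := if key.toList = [] then "default" else key
  let p_indices : List Int := plaintext.toList.map (fun c => ((c.toNat : Int)))
  let text_len := p_indices.length
  let k_indices : List Int := key.toList.map (fun c => ((c.toNat : Int)))
  let key_len := k_indices.length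
  let encrypted_chars : List Char :=
    (List.range text_len).foldl (fun acc i =>
      let p_val := p_indices.getD i 0
      let k_val := k_indices.getD (i % key_len) 0
      let s_val := p_val + k_val
      let d_val := s_val + (i : Int)
      let e_val := PySem.Int.mod (d_val - 32) 95 + 32
      acc ++ [Char.ofNat e_val.toNat]) []
  let final_output : List Char :=
    (PySem.List.pyRange 0 (text_len : Int) 8).foldl (fun acc i =>
      acc ++ (PySem.List.slice encrypted_chars (some i) (some (i + 8))).reverse) []
  String.mk final_output

-- ===== PORT B =====
-- `[''] * n` becomes a placeholder list (every slot is overwritten); `out[idx] = ch` is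
-- `PySem.List.pySetD` and `key[i % key_len]` is `PySem.List.pyGetD`, both in range hence exact.
def kpd_encrypt_alt (plaintext : String) (key : String) : String :=
  if plaintext.toList = [] then "" else
  let key := if key.toList = [] then "default" else key
  let cs := plaintext.toList
  let n := cs.length
  let ks := key.toList
  let key_len := ks.length
  let out0 : List Char := List.replicate n ' '
  let out := (PySem.List.enumerate cs).foldl (fun out ic =>
      let i := ic.1
      let c := ic.2
      let e_val := PySem.Int.mod ((c.toNat : Int)
        + ((PySem.List.pyGetD ks (PySem.Int.mod i (key_len : Int)) ' ').toNat : Int)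
        + i - 32) 95 + 32
      let start := PySem.Int.floordiv i 8 * 8
      let stop := min (start + 8) (n : Int)
      PySem.List.pySetD out (start + stop - 1 - i) (Char.ofNat e_val.toNat)) out0
  String.mk out

-- ===== PRECONDITION & SPEC =====
def Spec_kpd_encrypt (plaintext : String) (key : String) (out : String) : Prop := out = kpd_encrypt_alt plaintext key
instance (plaintext : String) (key : String) (out : String) : Decidable (Spec_kpd_encrypt plaintext key out) := by unfold Spec_kpd_encrypt; infer_instance

-- ===== CLAIM (what is proved, stated in full; the proofs are below) =====
def Claim_equal_kpd_encrypt : Prop := ∀ (plaintext : String) (key : String), Dom_kpd_encrypt plaintext key → Spec_kpd_encrypt plaintext key (kpd_encrypt plaintext key)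

-- ===== LEMMAS AND PROOFS =====

-- destination of position i under within-block reversal (blocks of 8, last block short)
def pvSigma (n i : Nat) : Nat := (i / 8) * 8 + min ((i / 8) * 8 + 8) n - 1 - i

-- the character A appends at position i of `encrypted_chars`
def pvF (cs ks : List Char) (i : Nat) : Char :=
  Char.ofNat (PySem.Int.mod (((cs.getD i ' ').toNat : Int)
    + ((ks.getD (i % ks.length) ' ').toNat : Int) + (i : Int) - 32) 95 + 32).toNat

theorem pvSigma_lt {n i : Nat} (h : i < n) : pvSigma n i < n := by unfold pvSigma; omega

theorem pvSigma_invol {n i : Nat} (h : i < n) : pvSigma n (pvSigma n i) = i := by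
  unfold pvSigma; omega

theorem pvSigma_block {n s j : Nat} (hs : s % 8 = 0) (h1 : s ≤ j) (h2 : j < s + 8)
    (h3 : j < n) : pvSigma n j = s + min (s + 8) n - 1 - j := by
  unfold pvSigma; omega

-- A's first loop builds exactly the list of per-position encrypted characters
theorem pv_A_enc (cs ks : List Char) (hk : ks ≠ []) :
    (List.range cs.length).foldl (fun acc i =>
      acc ++ [Char.ofNat (PySem.Int.mod ((cs.map (fun c => ((c.toNat : Int)))).getD i 0
        + (ks.map (fun c => ((c.toNat : Int)))).getD (i % ks.length) 0
        + (i : Int) - 32) 95 + 32).toNat]) []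
    = (List.range cs.length).map (pvF cs ks) := by
  rw [PySem.List.foldl_append_singleton_eq_map, List.nil_append]
  apply List.map_congr_left
  intro i hi
  rw [List.mem_range] at hi
  have hkl : 0 < ks.length := List.length_pos_iff.mpr hk
  have h1 : (cs.map (fun c => ((c.toNat : Int)))).getD i 0 = ((cs.getD i ' ').toNat : Int) := by
    simp [List.getD_eq_getElem?_getD, List.getElem?_map, List.getElem?_eq_getElem hi]
  have h2 : (ks.map (fun c => ((c.toNat : Int)))).getD (i % ks.length) 0
      = ((ks.getD (i % ks.length) ' ').toNat : Int) := by
    have : i % ks.length < ks.length := Nat.mod_lt _ hkl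
    simp [List.getD_eq_getElem?_getD, List.getElem?_map, List.getElem?_eq_getElem this]
  rw [h1, h2, pvF]

-- one reversed block, characterised position-wise through pvSigma
theorem pv_block_rev (n : Nat) (f : Nat → Char) (s : Nat) (hs : s % 8 = 0) (hsn : s < n) :
    ((((List.range n).map f).drop s).take 8).reverse
      = (List.range' s (min (s + 8) n - s)).map (fun j => f (pvSigma n j)) := by
  apply List.ext_getElem
  · simp; omega
  · intro i h1 h2
    simp only [List.length_reverse, List.length_take, List.length_drop, List.length_map,
      List.length_range, List.length_range'] at h1 h2
    rw [List.getElem_reverse]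
    simp only [List.length_take, List.length_drop, List.length_map, List.length_range]
    simp only [List.getElem_take, List.getElem_drop, List.getElem_map, List.getElem_range,
      List.getElem_range']
    rw [pvSigma_block hs (by omega) (by omega) (by omega)]
    congr 1
    omega

-- A's second loop applied to the encrypted list is the within-block reversal of it
theorem pv_A_blocks (n : Nat) (f : Nat → Char) (hn : 0 < n) :
    (PySem.List.pyRange 0 (n : Int) 8).foldl (fun acc i =>
      acc ++ (PySem.List.slice ((List.range n).map f) (some i) (some (i + 8))).reverse) []
    = (List.range n).map (fun j => f (pvSigma n j)) := by
  have hNB : PySem.List.pyRange 0 (n : Int) 8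
      = (List.range ((n + 7) / 8)).map (fun k => ((8 * k : Nat) : Int)) := by
    rw [PySem.List.pyRange_of_pos 0 ((n : Int)) (by norm_num)]
    have : (if (0:Int) < (n:Int) then (((n:Int) - 0 + 8 - 1) / 8).toNat else 0) = (n + 7) / 8 := by
      rw [if_pos (by exact_mod_cast hn)]; omega
    rw [this]
    apply List.map_congr_left
    intro k _
    push_cast
    ring
  rw [hNB, List.foldl_map]
  suffices h : ∀ t, t ≤ (n + 7) / 8 →
      (List.range t).foldl (fun acc k =>
        acc ++ (PySem.List.slice ((List.range n).map f) (some ((8 * k : Nat) : Int))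
          (some (((8 * k : Nat) : Int) + 8))).reverse) []
      = (List.range (min (8 * t) n)).map (fun j => f (pvSigma n j)) by
    have := h ((n + 7) / 8) le_rfl
    rw [this]
    congr 1
    congr 1
    omega
  intro t ht
  induction t with
  | zero => simp
  | succ t ih =>
    rw [List.range_succ, List.foldl_append, ih (by omega)]
    have h8t : 8 * t < n := by omega
    simp only [List.foldl_cons, List.foldl_nil]
    have hcast : ((8 * t : Nat) : Int) + 8 = ((8 * t : Nat) : Int) + ((8 : Nat) : Int) := by
      norm_num
    rw [hcast, PySem.List.slice_natCast_add]
    rw [pv_block_rev n f (8 * t) (by omega) h8t]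
    rw [← List.map_append]
    congr 1
    have : min (8 * t) n = 8 * t := by omega
    rw [this]
    rw [List.range_eq_range', List.range_eq_range']
    have happ := List.range'_append (s := 0) (m := 8 * t)
      (n := min (8 * t + 8) n - 8 * t) (step := 1)
    simp only [Nat.one_mul, Nat.zero_add] at happ
    rw [show min (8 * (t + 1)) n = 8 * t + (min (8 * t + 8) n - 8 * t) by omega, ← happ]

-- a fold over `enumerate l m` (l a suffix of cs) is a fold over the index range
theorem pv_enum_fold {α : Type} (F : List Char → (Int × α) → List Char)
    (cs : List α) (d : α) :
    ∀ (l : List α) (m : Nat), l = cs.drop m → ∀ (out : List Char),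
      (PySem.List.enumerate l (m : Int)).foldl F out
        = (List.range' m l.length).foldl
            (fun (o : List Char) (i : Nat) => F o ((i : Int), cs.getD i d)) out := by
  intro l
  induction l with
  | nil => intro m _ out; simp [PySem.List.enumerate]
  | cons c t ih =>
    intro m h out
    have hm : m < cs.length := by
      by_contra hh
      rw [List.drop_eq_nil_of_le (by omega)] at h
      simp at h
    rw [List.drop_eq_getElem_cons hm] at h
    obtain ⟨hc, ht⟩ : c = cs[m] ∧ t = cs.drop (m + 1) := by
      exact ⟨(List.cons.injEq _ _ _ _ ▸ h).1, (List.cons.injEq _ _ _ _ ▸ h).2⟩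
    rw [List.length_cons, List.range'_succ, List.foldl_cons]
    simp only [PySem.List.enumerate, List.foldl_cons]
    rw [List.getD_eq_getElem cs d hm, show cs[m] = c from hc.symm]
    have : ((m : Int) + 1) = (((m + 1 : Nat)) : Int) := by push_cast; ring
    rw [this, ih (m + 1) ht]

-- B's placement loop: after the first m writes, slot j holds its final character iff its
-- source position pvSigma j has been processed
theorem pv_B_fold (cs ks : List Char) :
    ∀ (m : Nat), m ≤ cs.length →
      (List.range' 0 m).foldl (fun o i => o.set (pvSigma cs.length i) (pvF cs ks i))
          (List.replicate cs.length ' ')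
        = (List.range cs.length).map (fun j =>
            if pvSigma cs.length j < m then pvF cs ks (pvSigma cs.length j) else ' ') := by
  intro m
  induction m with
  | zero =>
    intro _
    simp only [List.range'_zero, List.foldl_nil]
    apply List.ext_getElem
    · simp
    · intro j h1 h2
      simp
  | succ m ih =>
    intro hm
    rw [List.range'_concat, List.foldl_append, ih (by omega), List.foldl_cons, List.foldl_nil]
    simp only [Nat.zero_add, Nat.one_mul]
    apply List.ext_getElem
    · simp
    · intro j h1 h2
      simp only [List.length_set, List.length_map, List.length_range] at h1 h2 ⊢
      rw [List.getElem_set]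
      simp only [List.getElem_map, List.getElem_range]
      by_cases hj : pvSigma cs.length m = j
      · rw [if_pos hj]
        have : pvSigma cs.length j = m := by rw [← hj, pvSigma_invol (by omega)]
        rw [this, if_pos (by omega)]
      · rw [if_neg hj]
        have hne : pvSigma cs.length j ≠ m := by
          intro he
          apply hj
          rw [← he, pvSigma_invol h2]
        by_cases hlt : pvSigma cs.length j < m
        · rw [if_pos hlt, if_pos (by omega)]
        · rw [if_neg hlt, if_neg (by omega)]

-- ===== VERDICT (by name: the statement is the Claim_ definition above) =====
theorem kpd_encrypt_spec : Claim_equal_kpd_encrypt := by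
  intro plaintext key _
  unfold Spec_kpd_encrypt kpd_encrypt kpd_encrypt_alt
  by_cases hp : plaintext.toList = []
  · simp [hp]
  · rw [if_neg hp, if_neg hp]
    set key' := if key.toList = [] then "default" else key with hkey'
    set cs := plaintext.toList with hcs
    set ks := key'.toList with hks
    have hk : ks ≠ [] := by
      rw [hks, hkey']
      by_cases h : key.toList = [] <;> simp [h]
    have hn : 0 < cs.length := List.length_pos_iff.mpr hp
    simp only [List.length_map]
    have hkl : 0 < key'.toList.length := List.length_pos_iff.mpr hk
    -- A side
    rw [pv_A_enc cs key'.toList hk]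
    rw [pv_A_blocks cs.length (pvF cs key'.toList) hn]
    -- B side
    rw [show PySem.List.enumerate cs = PySem.List.enumerate cs (((0 : Nat) : Int)) from rfl]
    rw [pv_enum_fold _ cs ' ' cs 0 (by simp)]
    have hcong : ∀ (o : List Char), ∀ i ∈ List.range' 0 cs.length,
        PySem.List.pySetD o
            (PySem.Int.floordiv (i : Int) 8 * 8
              + min (PySem.Int.floordiv (i : Int) 8 * 8 + 8) (cs.length : Int) - 1 - (i : Int))
            (Char.ofNat
              (PySem.Int.mod
                  (((cs.getD i ' ').toNat : Int)
                    + ((PySem.List.pyGetD key'.toList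
                        (PySem.Int.mod (i : Int) (key'.toList.length : Int)) ' ').toNat : Int)
                    + (i : Int) - 32) 95 + 32).toNat)
          = o.set (pvSigma cs.length i) (pvF cs key'.toList i) := by
      intro o i hi
      rw [List.mem_range'_1] at hi
      rw [PySem.Int.mod_natCast, PySem.List.pyGetD_natCast]
      rw [PySem.Int.floordiv_eq_ediv_of_pos (by norm_num)]
      rw [PySem.List.pySetD_of_nonneg _ _ (by omega)]
      congr 1
      unfold pvSigma
      omega
    rw [PySem.List.foldl_congr_mem (List.range' 0 cs.length) _
      (fun o i => o.set (pvSigma cs.length i) (pvF cs key'.toList i)) _ (by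
        intro o i hi
        exact hcong o i hi)]
    rw [pv_B_fold cs key'.toList cs.length le_rfl]
    congr 1
    apply List.map_congr_left
    intro j hj
    rw [List.mem_range] at hj
    rw [if_pos (pvSigma_lt hj)]
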